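-- pv_equiv track=rewrite | github.com/jpdotcom/Hackerrank-solutions | FirstTower(Medium)Solution.py | findFirstTower
-- ===== SOURCE A (Python) =====
-- def findFirstTower(k,arr):
--     x=0
--     i=0
--     found=False
--     while i<k:
--         if arr[i]==1:
--             found=True
--             x=i
--         i+=1
--     if not found:
--         return -1
--     return x
-- ===== SOURCE B (Python) =====
-- def findFirstTower(k, arr):
--     i = k - 1
--     while i >= 0:
--         if arr[i] == 1:
--             return i
--         i -= 1
--     return -1
-- ===== Notes on version B (the rewrite author's own statement) =====
-- stated objective: simpler
-- what changed: B scans backwards from index k-1 and returns the first 1 it meets (the last 1 of the forward view), dropping A's accumulator x and found flag; k>len(arr) still raises IndexError via indexing.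
import Mathlib
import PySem

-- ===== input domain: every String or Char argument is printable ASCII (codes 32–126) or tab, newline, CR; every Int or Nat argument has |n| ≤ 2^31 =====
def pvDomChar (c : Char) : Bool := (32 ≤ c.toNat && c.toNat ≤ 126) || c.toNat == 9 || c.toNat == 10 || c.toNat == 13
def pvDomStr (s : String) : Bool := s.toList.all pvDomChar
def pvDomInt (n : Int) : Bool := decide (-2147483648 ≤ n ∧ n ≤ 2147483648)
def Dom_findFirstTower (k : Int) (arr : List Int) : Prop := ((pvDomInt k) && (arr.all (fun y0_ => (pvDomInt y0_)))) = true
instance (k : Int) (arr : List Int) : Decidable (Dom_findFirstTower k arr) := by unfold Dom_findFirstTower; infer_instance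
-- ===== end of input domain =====

-- B scans backwards from index k-1 and returns the first 1 it meets (the last 1 forward), dropping A's accumulator and flag; objective: simpler.


-- ===== PORT A =====
-- A's while loop: i counts up, x remembers the last index holding 1, found says whether any was seen.
-- arr[i] is PySem.List.pyGet?; Pre_ keeps indexing in range, so .getD 0 never hits its default.
def findFirstTowerLoop (arr : List Int) (k i x : Int) (found : Bool) : Int :=
  if h : i < k then
    if (PySem.List.pyGet? arr i).getD 0 = 1 then
      findFirstTowerLoop arr k (i + 1) i true
    else
      findFirstTowerLoop arr k (i + 1) x found
  else
    if !found then -1 else x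
termination_by (k - i).toNat
decreasing_by all_goals omega

def findFirstTower (k : Int) (arr : List Int) : Int :=
  findFirstTowerLoop arr k 0 0 false

-- ===== PORT B =====
-- B's while loop: i counts down from k-1, returning at the first 1.
def findFirstTowerAltLoop (arr : List Int) (i : Int) : Int :=
  if h : i ≥ 0 then
    if (PySem.List.pyGet? arr i).getD 0 = 1 then i
    else findFirstTowerAltLoop arr (i - 1)
  else
    -1
termination_by (i + 1).toNat
decreasing_by omega

def findFirstTower_alt (k : Int) (arr : List Int) : Int :=
  findFirstTowerAltLoop arr (k - 1)

-- ===== PRECONDITION & SPEC =====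
-- Pre_ excludes exactly the inputs where Python A raises IndexError: k > len(arr) (B raises there too).
def Pre_findFirstTower (k : Int) (arr : List Int) : Prop := k ≤ (arr.length : Int)
instance (k : Int) (arr : List Int) : Decidable (Pre_findFirstTower k arr) := by unfold Pre_findFirstTower; infer_instance
def pvWitness_findFirstTower : Int × List Int := (3, [0, 1, 0, 1])

def Spec_findFirstTower (k : Int) (arr : List Int) (out : Int) : Prop := out = findFirstTower_alt k arr
instance (k : Int) (arr : List Int) (out : Int) : Decidable (Spec_findFirstTower k arr out) := by unfold Spec_findFirstTower; infer_instance

-- ===== CLAIM (what is proved, stated in full; the proofs are below) =====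
def Claim_equal_findFirstTower : Prop := ∀ (k : Int) (arr : List Int), Dom_findFirstTower k arr → Pre_findFirstTower k arr → Spec_findFirstTower k arr (findFirstTower k arr)

-- ===== LEMMAS AND PROOFS =====

-- Peeling the LAST iteration off A's forward loop.
theorem loopA_peel (arr : List Int) (n : Nat) :
    ∀ (d i : Nat) (x : Int) (found : Bool), i ≤ n → n - i = d →
    findFirstTowerLoop arr (↑(n + 1)) (↑i) x found =
      if (PySem.List.pyGet? arr (↑n)).getD 0 = 1 then (↑n : Int)
      else findFirstTowerLoop arr (↑n) (↑i) x found := by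
  intro d
  induction d with
  | zero =>
    intro i x found hle hd
    have : i = n := by omega
    subst this
    rw [findFirstTowerLoop, dif_pos (show (↑i : Int) < ↑(i + 1) by push_cast; omega)]
    conv_rhs => rw [findFirstTowerLoop, dif_neg (show ¬((↑i : Int) < ↑i) by omega)]
    split
    · rw [findFirstTowerLoop, dif_neg (show ¬((↑i : Int) + 1 < ↑(i + 1)) by push_cast; omega)]
      rfl
    · rw [findFirstTowerLoop, dif_neg (show ¬((↑i : Int) + 1 < ↑(i + 1)) by push_cast; omega)]
  | succ d ih =>
    intro i x found hle hd
    rw [findFirstTowerLoop, dif_pos (show (↑i : Int) < ↑(n + 1) by push_cast; omega)]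
    conv_rhs => rw [findFirstTowerLoop, dif_pos (show (↑i : Int) < ↑n by push_cast; omega)]
    have hcast : (↑i : Int) + 1 = ↑(i + 1) := by push_cast; ring
    split
    · rw [hcast, ih (i + 1) (↑i) true (by omega) (by omega)]
    · rw [hcast, ih (i + 1) x found (by omega) (by omega)]

-- Full runs agree: A's forward last-1 scan equals B's backward first-1 scan.
theorem runs_eq (arr : List Int) : ∀ (n : Nat),
    findFirstTowerLoop arr (↑n) 0 0 false = findFirstTowerAltLoop arr ((↑n : Int) - 1) := by
  intro n
  induction n with
  | zero =>
    rw [findFirstTowerLoop, findFirstTowerAltLoop]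
    norm_num
  | succ n ih =>
    have hp := loopA_peel arr n n 0 (0 : Int) false (by omega) (by omega)
    simp only [Nat.cast_zero] at hp
    rw [hp]
    conv_rhs => rw [show ((↑(n + 1) : Int) - 1) = (↑n : Int) by push_cast; ring,
      findFirstTowerAltLoop, dif_pos (show (↑n : Int) ≥ 0 by positivity)]
    split
    · rfl
    · rw [ih]

-- Negative or zero k: both loops terminate immediately with -1.
theorem both_neg (k : Int) (arr : List Int) (hk : k ≤ 0) :
    findFirstTower k arr = findFirstTower_alt k arr := by
  rw [findFirstTower, findFirstTower_alt, findFirstTowerLoop, findFirstTowerAltLoop,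
    dif_neg (show ¬((0 : Int) < k) by omega), dif_neg (show ¬(k - 1 ≥ 0) by omega)]
  rfl

-- ===== VERDICT (by name: the statement is the Claim_ definition above) =====
theorem findFirstTower_spec : Claim_equal_findFirstTower := by
  intro k arr _ _
  unfold Spec_findFirstTower
  by_cases hk : k ≤ 0
  · exact both_neg k arr hk
  · rw [not_le] at hk
    have hkn : k = (↑k.toNat : Int) := by omega
    rw [findFirstTower, findFirstTower_alt, hkn]
    exact runs_eq arr k.toNat
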